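-- pv_equiv track=rewrite | github.com/rhamenator/ai-scraping-defense | scripts/security/attack_regression.py | _prompt_rate_limit_ok
-- ===== SOURCE A (Python) =====
-- def _prompt_rate_limit_ok(statuses: list[int]) -> bool:
--     if not statuses or 429 not in statuses:
--         return False
--     limit_index = statuses.index(429)
--     prior_statuses = statuses[:limit_index]
--     if not prior_statuses:
--         return False
--     if any(status >= 500 or status in {0, 401} for status in prior_statuses):
--         return False
--     return True
-- ===== SOURCE B (Python) =====
-- def _prompt_rate_limit_ok(statuses: list[int]) -> bool:
--     count = 0
--     for status in statuses:
--         if status == 429: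
--             return count > 0
--         if status >= 500 or status in (0, 401):
--             return False
--         count += 1
--     return False
-- ===== Notes on version B (the rewrite author's own statement) =====
-- stated objective: simpler
-- what changed: Replaced the multi-scan approach (membership test, .index, slice copy, any over the prefix) with a single left-to-right loop that counts valid statuses and decides at the first 429 or first bad status.
import Mathlib
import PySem

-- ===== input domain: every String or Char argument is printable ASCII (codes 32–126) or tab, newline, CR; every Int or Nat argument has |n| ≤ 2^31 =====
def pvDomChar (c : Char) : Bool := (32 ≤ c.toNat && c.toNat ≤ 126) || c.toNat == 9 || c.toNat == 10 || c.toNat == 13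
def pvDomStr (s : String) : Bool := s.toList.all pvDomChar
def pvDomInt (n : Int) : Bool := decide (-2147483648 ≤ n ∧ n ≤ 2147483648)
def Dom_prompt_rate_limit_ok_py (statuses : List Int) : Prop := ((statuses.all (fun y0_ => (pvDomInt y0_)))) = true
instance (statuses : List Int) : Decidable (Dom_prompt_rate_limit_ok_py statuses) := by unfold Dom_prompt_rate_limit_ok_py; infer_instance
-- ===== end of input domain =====

-- B fuses A's three scans (membership test, .index + slice copy, any over the prefix) into one counting pass; objective: simpler.

-- ===== PORT A =====
def prompt_rate_limit_ok_py (statuses : List Int) : Bool :=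
  if statuses.isEmpty || !(statuses.contains 429) then false
  else
    match PySem.List.index? statuses 429 with
    | none => false  -- unreachable: 429 ∈ statuses here
    | some limit_index =>
      let prior_statuses := PySem.List.slice statuses none (some (limit_index : Int))  -- statuses[:limit_index]
      if prior_statuses.isEmpty then false
      else if prior_statuses.any (fun status => decide (500 ≤ status) || status == 0 || status == 401) then false
      else true

-- ===== PORT B =====
def pvAltLoop : List Int → Int → Bool
  | [], _ => false
  | status :: rest, count =>
    if status == 429 then decide (0 < count)
    else if decide (500 ≤ status) || status == 0 || status == 401 then false
    else pvAltLoop rest (count + 1)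

def prompt_rate_limit_ok_py_alt (statuses : List Int) : Bool := pvAltLoop statuses 0

-- ===== PRECONDITION & SPEC =====
def Spec_prompt_rate_limit_ok_py (statuses : List Int) (out : Bool) : Prop := out = prompt_rate_limit_ok_py_alt statuses
instance (statuses : List Int) (out : Bool) : Decidable (Spec_prompt_rate_limit_ok_py statuses out) := by unfold Spec_prompt_rate_limit_ok_py; infer_instance

-- ===== CLAIM (what is proved, stated in full; the proofs are below) =====
def Claim_equal_prompt_rate_limit_ok_py : Prop := ∀ (statuses : List Int), Dom_prompt_rate_limit_ok_py statuses → Spec_prompt_rate_limit_ok_py statuses (prompt_rate_limit_ok_py statuses)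

-- ===== LEMMAS AND PROOFS =====

/-- "429 is reachable through good statuses" — what `pvAltLoop` computes once `count > 0`. -/
def pvOkPos : List Int → Bool
  | [] => false
  | x :: xs =>
    if x == 429 then true
    else if decide (500 ≤ x) || x == 0 || x == 401 then false
    else pvOkPos xs

lemma pvAltLoop_pos (xs : List Int) : ∀ c : Int, 0 < c → pvAltLoop xs c = pvOkPos xs := by
  induction xs with
  | nil => intro c hc; rfl
  | cons x xs ih =>
    intro c hc
    simp only [pvAltLoop, pvOkPos]
    by_cases h429 : x == 429
    · simp [h429, hc]
    · simp only [h429, Bool.false_eq_true, if_false]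
      by_cases hbad : (decide (500 ≤ x) || x == 0 || x == 401) = true
      · simp [hbad]
      · simp only [hbad]
        exact ih (c + 1) (by omega)

lemma pvOkPos_eq (xs : List Int) :
    pvOkPos xs = (match PySem.List.index? xs 429 with
      | none => false
      | some k => !((xs.take k).any (fun s => decide (500 ≤ s) || s == 0 || s == 401))) := by
  induction xs with
  | nil => rfl
  | cons x xs ih =>
    by_cases h429 : x = 429
    · subst h429
      rw [PySem.List.index?_cons_self]
      simp [pvOkPos]
    · rw [PySem.List.index?_cons_of_ne xs h429]
      simp only [pvOkPos, beq_iff_eq, if_neg h429]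
      cases hidx : PySem.List.index? xs 429 with
      | none =>
        rw [hidx] at ih
        simp only [Option.map_none]
        by_cases hbad : (decide (500 ≤ x) || x == 0 || x == 401) = true
        · simp [hbad]
        · simp only [hbad]; exact ih
      | some k =>
        rw [hidx] at ih
        simp only [Option.map_some]
        by_cases hbad : (decide (500 ≤ x) || x == 0 || x == 401) = true
        · simp [hbad, List.take_succ_cons]
        · simp only [hbad]
          rw [ih]
          simp [List.take_succ_cons, hbad]

-- ===== VERDICT (by name: the statement is the Claim_ definition above) =====
theorem prompt_rate_limit_ok_py_spec : Claim_equal_prompt_rate_limit_ok_py := by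
  intro statuses _
  show prompt_rate_limit_ok_py statuses = prompt_rate_limit_ok_py_alt statuses
  unfold prompt_rate_limit_ok_py prompt_rate_limit_ok_py_alt
  cases statuses with
  | nil => rfl
  | cons x xs =>
    by_cases h429 : x = 429
    · subst h429
      have hc : ((429 : Int) :: xs).contains 429 = true := by simp
      rw [PySem.List.index?_cons_self]
      simp [pvAltLoop, PySem.List.slice_to]
    · simp only [pvAltLoop, beq_iff_eq, if_neg h429]
      by_cases hmem : (429 : Int) ∈ xs
      · have hc : (x :: xs).contains 429 = true := by
          simp only [List.contains_cons, Bool.or_eq_true, beq_iff_eq]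
          exact Or.inr (by simpa using hmem)
        have hcondn : ¬(((x :: xs).isEmpty || !(x :: xs).contains 429) = true) := by
          rw [hc]; simp
        obtain ⟨k, hk⟩ := Option.isSome_iff_exists.mp
          ((PySem.List.index?_isSome_iff xs 429).mpr hmem)
        rw [if_neg hcondn, PySem.List.index?_cons_of_ne xs h429, hk]
        simp only [Option.map_some, PySem.List.slice_to_natCast, List.take_succ_cons]
        by_cases hbad : (decide (500 ≤ x) || x == 0 || x == 401) = true
        · simp [hbad]
        · rw [if_neg hbad, pvAltLoop_pos xs (0 + 1) (by omega), pvOkPos_eq, hk]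
          simp [List.any_eq]
          intro _
          simp only [Bool.or_eq_true, beq_iff_eq, decide_eq_true_eq, not_or] at hbad
          omega
      · have hc : (x :: xs).contains 429 = false := by
          simp only [List.contains_cons, Bool.or_eq_false_iff, beq_eq_false_iff_ne]
          refine ⟨fun h => h429 h.symm, ?_⟩
          simpa using hmem
        have hcond : (((x :: xs).isEmpty || !(x :: xs).contains 429) = true) := by
          rw [hc]; simp
        rw [if_pos hcond]
        by_cases hbad : (decide (500 ≤ x) || x == 0 || x == 401) = true
        · rw [if_pos hbad]
        · rw [if_neg hbad, pvAltLoop_pos xs (0 + 1) (by omega), pvOkPos_eq,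
            (PySem.List.index?_eq_none_iff xs 429).mpr hmem]
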